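-- pv_equiv track=rewrite | github.com/mahalisyarifuddin/HilalCalc | scripts/find_best_tabular.py | get_tabular_jd
-- ===== SOURCE A (Python) =====
-- def get_tabular_jd(Index, leap_years):
--     cycle = Index // 360
--     idx_in_cycle = Index % 360
--     y_in_cycle = idx_in_cycle // 12
--     m_in_year = idx_in_cycle % 12
--
--     days = cycle * 10631
--     for y in range(y_in_cycle):
--         days += 355 if (y + 1) in leap_years else 354
--     for m in range(m_in_year):
--         days += 30 if m % 2 == 0 else 29
--     return 1948440 + days
-- ===== SOURCE B (Python) =====
-- def get_tabular_jd(Index, leap_years):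
--     cycle = Index // 360
--     idx_in_cycle = Index % 360
--     y_in_cycle = idx_in_cycle // 12
--     h = idx_in_cycle % 12
--
--     leaps = sum(1 for v in set(leap_years) if 1 <= v <= y_in_cycle)
--     days = (cycle * 10631 + 354 * y_in_cycle + leaps
--             + 30 * ((h + 1) // 2) + 29 * (h // 2))
--     return 1948440 + days
-- ===== Notes on version B (the rewrite author's own statement) =====
-- stated objective: simpler
-- what changed: Both accumulation loops were replaced by closed forms: the per-year loop becomes 354*y plus a deduplicated count of leap years in [1, y], and the per-month loop becomes 30*((h+1)//2) + 29*(h//2).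
import Mathlib
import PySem

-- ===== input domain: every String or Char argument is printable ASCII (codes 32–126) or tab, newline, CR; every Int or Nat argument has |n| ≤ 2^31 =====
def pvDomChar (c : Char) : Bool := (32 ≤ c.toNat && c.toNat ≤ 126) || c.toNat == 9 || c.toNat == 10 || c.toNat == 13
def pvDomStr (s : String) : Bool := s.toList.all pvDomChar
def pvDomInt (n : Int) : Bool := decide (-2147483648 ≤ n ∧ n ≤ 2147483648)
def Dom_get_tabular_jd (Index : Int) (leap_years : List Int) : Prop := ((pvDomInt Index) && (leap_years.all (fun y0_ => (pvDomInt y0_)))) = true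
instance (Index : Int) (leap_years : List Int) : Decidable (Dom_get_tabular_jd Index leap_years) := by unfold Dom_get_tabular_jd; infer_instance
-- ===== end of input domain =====

-- B replaces both per-year and per-month accumulation loops with closed forms:
-- a deduplicated count of leap years in range and an arithmetic month-day formula (objective: simpler).

-- ===== PORT A =====
def get_tabular_jd (Index : Int) (leap_years : List Int) : Int :=
  let cycle := PySem.Int.floordiv Index 360
  let idx_in_cycle := PySem.Int.mod Index 360
  let y_in_cycle := PySem.Int.floordiv idx_in_cycle 12
  let m_in_year := PySem.Int.mod idx_in_cycle 12
  let days := cycle * 10631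
  let days := (PySem.List.pyRange 0 y_in_cycle 1).foldl
    (fun d y => d + if (y + 1) ∈ leap_years then 355 else 354) days
  let days := (PySem.List.pyRange 0 m_in_year 1).foldl
    (fun d m => d + if PySem.Int.mod m 2 = 0 then 30 else 29) days
  1948440 + days

-- ===== PORT B =====
def get_tabular_jd_alt (Index : Int) (leap_years : List Int) : Int :=
  let cycle := PySem.Int.floordiv Index 360
  let idx_in_cycle := PySem.Int.mod Index 360
  let y_in_cycle := PySem.Int.floordiv idx_in_cycle 12
  let h := PySem.Int.mod idx_in_cycle 12
  let leaps : Int :=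
    ((PySem.Set.ofList leap_years).filter (fun v => decide (1 ≤ v ∧ v ≤ y_in_cycle))).length
  let days := cycle * 10631 + 354 * y_in_cycle + leaps
    + 30 * PySem.Int.floordiv (h + 1) 2 + 29 * PySem.Int.floordiv h 2
  1948440 + days

-- ===== PRECONDITION & SPEC =====
def Spec_get_tabular_jd (Index : Int) (leap_years : List Int) (out : Int) : Prop := out = get_tabular_jd_alt Index leap_years
instance (Index : Int) (leap_years : List Int) (out : Int) : Decidable (Spec_get_tabular_jd Index leap_years out) := by unfold Spec_get_tabular_jd; infer_instance

-- ===== CLAIM (what is proved, stated in full; the proofs are below) =====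
def Claim_equal_get_tabular_jd : Prop := ∀ (Index : Int) (leap_years : List Int), Dom_get_tabular_jd Index leap_years → Spec_get_tabular_jd Index leap_years (get_tabular_jd Index leap_years)

-- ===== LEMMAS AND PROOFS =====

-- the month loop equals the closed arithmetic form, for 0 ≤ h < 12
lemma month_loop_closed (h days : Int) (h0 : 0 ≤ h) (h12 : h < 12) :
    (PySem.List.pyRange 0 h 1).foldl
      (fun d m => d + if PySem.Int.mod m 2 = 0 then 30 else 29) days
    = days + 30 * PySem.Int.floordiv (h + 1) 2 + 29 * PySem.Int.floordiv h 2 := by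
  simp only [PySem.List.foldl_add]
  interval_cases h <;> (rw [add_assoc]; congr 1)

-- the year loop equals 354 per year plus the number of years k ∈ [1, y] that are in leap_years
lemma year_loop_closed (y days : Int) (lys : List Int) (h0 : 0 ≤ y) :
    (PySem.List.pyRange 0 y 1).foldl
      (fun d yy => d + if (yy + 1) ∈ lys then 355 else 354) days
    = days + 354 * y
      + ((PySem.List.pyRange 1 (y + 1) 1).countP (fun k => decide (k ∈ lys)) : Int) := by
  simp only [PySem.List.foldl_add]
  have hmap : (PySem.List.pyRange 0 y 1).map
      (fun yy => if (yy + 1) ∈ lys then (355:Int) else 354)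
      = (PySem.List.pyRange 0 y 1).map
        (fun yy => 354 + if decide ((yy + 1) ∈ lys) = true then (1:Int) else 0) := by
    apply List.map_congr_left; intro x _
    by_cases hx : (x + 1) ∈ lys <;> simp [hx]
  rw [hmap]
  have := PySem.List.sum_map_add_int (PySem.List.pyRange 0 y 1)
    (fun _ => (354:Int)) (fun yy => if decide ((yy + 1) ∈ lys) = true then (1:Int) else 0)
  simp only [this]
  rw [PySem.List.sum_map_const_int, PySem.List.sum_map_ite_one_zero,
    PySem.List.length_pyRange_one]
  have hcnt : (PySem.List.pyRange 0 y 1).countP (fun yy => decide ((yy + 1) ∈ lys))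
      = (PySem.List.pyRange 1 (y + 1) 1).countP (fun k => decide (k ∈ lys)) := by
    rw [PySem.List.pyRange_one 0 y, PySem.List.pyRange_one 1 (y + 1)]
    simp only [List.countP_map]
    have : (y - 0).toNat = (y + 1 - 1).toNat := by omega
    rw [this]
    apply List.countP_congr; intro k _
    simp [add_comm]
  rw [hcnt]
  have : ((y - 0).toNat : Int) = y := by omega
  rw [this]; ring

-- counting members of [1, y] in lys = counting deduplicated elements of lys lying in [1, y]
lemma count_range_mem_eq_filter_set (y : Int) (lys : List Int) :
    ((PySem.List.pyRange 1 (y + 1) 1).countP (fun k => decide (k ∈ lys)) : Int)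
    = (((PySem.Set.ofList lys).filter (fun v => decide (1 ≤ v ∧ v ≤ y))).length : Int) := by
  congr 1
  rw [List.countP_eq_length_filter]
  have h1 : ((PySem.List.pyRange 1 (y + 1) 1).filter (fun k => decide (k ∈ lys))).Nodup :=
    (PySem.List.nodup_pyRange_one 1 (y + 1)).filter _
  have h2 : ((PySem.Set.ofList lys).filter (fun v => decide (1 ≤ v ∧ v ≤ y))).Nodup :=
    (PySem.Set.nodup_ofList lys).filter _
  rw [← List.toFinset_card_of_nodup h1, ← List.toFinset_card_of_nodup h2]
  congr 1
  ext x
  simp only [List.mem_toFinset, List.mem_filter, PySem.List.mem_pyRange_one,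
    PySem.Set.mem_ofList, decide_eq_true_eq]
  constructor
  · rintro ⟨⟨hl, hr⟩, hm⟩; exact ⟨hm, hl, by omega⟩
  · rintro ⟨hm, hl, hr⟩; exact ⟨⟨hl, by omega⟩, hm⟩

-- ===== VERDICT (by name: the statement is the Claim_ definition above) =====
theorem get_tabular_jd_spec : Claim_equal_get_tabular_jd := by
  intro Index lys _
  unfold Spec_get_tabular_jd get_tabular_jd get_tabular_jd_alt
  dsimp only
  have hidx0 : 0 ≤ PySem.Int.mod Index 360 := PySem.Int.mod_nonneg Index (by norm_num)
  have hidx : PySem.Int.mod Index 360 < 360 := PySem.Int.mod_lt Index (by norm_num)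
  have hy0 : 0 ≤ PySem.Int.floordiv (PySem.Int.mod Index 360) 12 := by
    rw [PySem.Int.floordiv_eq_ediv_of_pos (by norm_num)]
    exact Int.ediv_nonneg hidx0 (by norm_num)
  have hm0 : 0 ≤ PySem.Int.mod (PySem.Int.mod Index 360) 12 :=
    PySem.Int.mod_nonneg _ (by norm_num)
  have hm12 : PySem.Int.mod (PySem.Int.mod Index 360) 12 < 12 :=
    PySem.Int.mod_lt _ (by norm_num)
  rw [year_loop_closed _ _ _ hy0, month_loop_closed _ _ hm0 hm12,
    count_range_mem_eq_filter_set]
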